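-- pv_equiv track=rewrite | github.com/triyys/training-python-syntax | bai53.py | get_surrounded_elements
-- ===== SOURCE A (Python) =====
-- def is_valid_index(matrix: list[list[int]], i: int, j: int) -> bool:
--     return 0 <= i < len(matrix) and 0 <= j < len(matrix[0])
--
-- def get_surrounded_elements(matrix: list[list[int]], center_i: int, center_j: int) -> list[int]:
--     result = []
--
--     positions = [
--         (-1, -1),
--         (-1, 0),
--         (-1, 1),
--         (0, -1),
--         (0, 1),
--         (1, -1),
--         (1, 0),
--         (1, 1),
--     ]
--
--     for position in positions:
--         if is_valid_index(matrix, center_i + position[0], center_j + position[1]):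
--             result.append(matrix[center_i + position[0]][center_j + position[1]])
--
--     return result
-- ===== SOURCE B (Python) =====
-- def get_surrounded_elements(matrix: list[list[int]], center_i: int, center_j: int) -> list[int]:
--     return [
--         matrix[i][j]
--         for i in range(max(0, center_i - 1), min(len(matrix), center_i + 2))
--         for j in range(max(0, center_j - 1), min(len(matrix[0]), center_j + 2))
--         if (i, j) != (center_i, center_j)
--     ]
-- ===== Notes on version B (the rewrite author's own statement) =====
-- stated objective: alternative
-- what changed: B replaces A's scan over eight offset pairs with a per-position validity predicate by a single comprehension over clipped row/column ranges (max/min bounds computed once), skipping only the center cell.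
import Mathlib
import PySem

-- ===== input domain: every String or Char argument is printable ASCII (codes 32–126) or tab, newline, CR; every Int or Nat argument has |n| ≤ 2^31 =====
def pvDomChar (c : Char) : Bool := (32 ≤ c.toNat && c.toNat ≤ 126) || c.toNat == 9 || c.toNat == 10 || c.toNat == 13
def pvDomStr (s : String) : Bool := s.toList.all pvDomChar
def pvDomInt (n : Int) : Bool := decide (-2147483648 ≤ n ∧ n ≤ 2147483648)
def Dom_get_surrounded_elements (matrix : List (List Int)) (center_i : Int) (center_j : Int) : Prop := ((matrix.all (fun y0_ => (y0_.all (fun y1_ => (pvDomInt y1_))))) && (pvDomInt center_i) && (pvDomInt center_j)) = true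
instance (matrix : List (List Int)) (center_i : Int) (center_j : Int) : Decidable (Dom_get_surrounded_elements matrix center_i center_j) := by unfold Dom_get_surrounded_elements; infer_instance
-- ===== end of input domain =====

-- B replaces A's scan over eight offset pairs (each guarded by a validity predicate) with one
-- comprehension over clipped row/column ranges, skipping only the center cell (objective: alternative).

-- ===== PORT A =====
-- '0 <= i < len(matrix) and 0 <= j < len(matrix[0])'; matrix[0] is only reached when the first
-- conjunct holds, so the value agrees with using headD [] (length 0 makes the conjunct false anyway).
def is_valid_index (matrix : List (List Int)) (i : Int) (j : Int) : Bool :=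
  decide (0 ≤ i ∧ i < (matrix.length : Int)) && decide (0 ≤ j ∧ j < ((matrix.headD []).length : Int))

def get_surrounded_elements (matrix : List (List Int)) (center_i : Int) (center_j : Int) : List Int :=
  let positions : List (Int × Int) :=
    [(-1, -1), (-1, 0), (-1, 1), (0, -1), (0, 1), (1, -1), (1, 0), (1, 1)]
  positions.foldl (fun result position =>
    if is_valid_index matrix (center_i + position.1) (center_j + position.2) then
      result ++ [PySem.List.pyGetD (PySem.List.pyGetD matrix (center_i + position.1) []) (center_j + position.2) 0]
    else result) []

-- ===== PORT B =====
def get_surrounded_elements_alt (matrix : List (List Int)) (center_i : Int) (center_j : Int) : List Int :=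
  (PySem.List.pyRange (max 0 (center_i - 1)) (min (matrix.length : Int) (center_i + 2)) 1).foldl
    (fun out i =>
      (PySem.List.pyRange (max 0 (center_j - 1)) (min ((matrix.headD []).length : Int) (center_j + 2)) 1).foldl
        (fun out j =>
          if (i, j) ≠ (center_i, center_j) then
            out ++ [PySem.List.pyGetD (PySem.List.pyGetD matrix i []) j 0]
          else out) out) []

-- ===== PRECONDITION & SPEC =====
-- Pre_ excludes exactly the jagged matrices on which the Python raises IndexError: an accessed
-- neighbour cell whose column index fits row 0's width but not its own row's length (both A and B
-- raise there, at the same cell).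
def Pre_get_surrounded_elements (matrix : List (List Int)) (center_i : Int) (center_j : Int) : Prop :=
  ∀ i ∈ [center_i - 1, center_i, center_i + 1], ∀ j ∈ [center_j - 1, center_j, center_j + 1],
    ¬(i = center_i ∧ j = center_j) →
    0 ≤ i → i < (matrix.length : Int) →
    0 ≤ j → j < ((matrix.headD []).length : Int) →
    j < ((matrix.getD i.toNat []).length : Int)
instance (matrix : List (List Int)) (center_i : Int) (center_j : Int) : Decidable (Pre_get_surrounded_elements matrix center_i center_j) := by unfold Pre_get_surrounded_elements; infer_instance
def pvWitness_get_surrounded_elements : List (List Int) × Int × Int := ([[1, 2, 3], [4, 5, 6], [7, 8, 9]], 1, 1)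

def Spec_get_surrounded_elements (matrix : List (List Int)) (center_i : Int) (center_j : Int) (out : List Int) : Prop := out = get_surrounded_elements_alt matrix center_i center_j
instance (matrix : List (List Int)) (center_i : Int) (center_j : Int) (out : List Int) : Decidable (Spec_get_surrounded_elements matrix center_i center_j out) := by unfold Spec_get_surrounded_elements; infer_instance

-- ===== CLAIM (what is proved, stated in full; the proofs are below) =====
def Claim_equal_get_surrounded_elements : Prop := ∀ (matrix : List (List Int)) (center_i : Int) (center_j : Int), Dom_get_surrounded_elements matrix center_i center_j → Pre_get_surrounded_elements matrix center_i center_j → Spec_get_surrounded_elements matrix center_i center_j (get_surrounded_elements matrix center_i center_j)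

-- ===== LEMMAS AND PROOFS =====

-- two strictly increasing Int lists with the same members are equal
theorem pv_sorted_ext (l1 l2 : List Int) (h1 : l1.Pairwise (· < ·)) (h2 : l2.Pairwise (· < ·))
    (h : ∀ x, x ∈ l1 ↔ x ∈ l2) : l1 = l2 :=
  List.Perm.eq_of_pairwise' h1 h2
    ((List.perm_ext_iff_of_nodup (show l1.Nodup from h1.imp ne_of_lt) (show l2.Nodup from h2.imp ne_of_lt)).mpr h)

-- clipping a range to [0, n) is filtering the unclipped range
theorem pv_clip (a b n : Int) :
    PySem.List.pyRange (max 0 a) (min n b) 1 =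
      (PySem.List.pyRange a b 1).filter (fun x => decide (0 ≤ x ∧ x < n)) := by
  refine pv_sorted_ext _ _ (PySem.List.pairwise_lt_pyRange_one _ _)
    ((PySem.List.pairwise_lt_pyRange_one _ _).filter _) (fun x => ?_)
  simp [PySem.List.mem_pyRange_one, List.mem_filter]
  omega

theorem pv_range3 (a : Int) :
    PySem.List.pyRange (a - 1) (a + 2) 1 = [a - 1, a, a + 1] := by
  rw [PySem.List.pyRange_one_cons (show a - 1 < a + 2 by omega),
      PySem.List.pyRange_one_cons (show a - 1 + 1 < a + 2 by omega),
      PySem.List.pyRange_one_cons (show a - 1 + 1 + 1 < a + 2 by omega),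
      PySem.List.pyRange_one_eq_nil (show a + 2 ≤ a - 1 + 1 + 1 + 1 by omega)]
  norm_num

-- the 8-offset guarded scan equals the clipped double loop, abstractly
theorem pv_key (p q : Int → Bool) (f : Int → Int → Int) (i1 i2 i3 j1 j2 j3 : Int)
    (hi1 : i1 ≠ i2) (hi3 : i3 ≠ i2) (hj1 : j1 ≠ j2) (hj3 : j3 ≠ j2) :
    ([(i1, j1), (i1, j2), (i1, j3), (i2, j1), (i2, j3), (i3, j1), (i3, j2), (i3, j3)].foldl
        (fun res pos => if p pos.1 && q pos.2 then res ++ [f pos.1 pos.2] else res) []) =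
      (([i1, i2, i3].filter p).foldl
        (fun out i => (([j1, j2, j3].filter q).foldl
          (fun out j => if (i, j) ≠ (i2, j2) then out ++ [f i j] else out) out)) []) := by
  cases hp1 : p i1 <;> cases hp2 : p i2 <;> cases hp3 : p i3 <;>
  cases hq1 : q j1 <;> cases hq2 : q j2 <;> cases hq3 : q j3 <;>
  simp [List.filter, List.foldl, hp1, hp2, hp3, hq1, hq2, hq3, hi1, hi3, hj1, hj3]

-- ===== VERDICT (by name: the statement is the Claim_ definition above) =====
theorem get_surrounded_elements_spec : Claim_equal_get_surrounded_elements := by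
  intro matrix ci cj _ _
  unfold Spec_get_surrounded_elements
  calc get_surrounded_elements matrix ci cj
      = ([(ci + -1, cj + -1), (ci + -1, cj + 0), (ci + -1, cj + 1), (ci + 0, cj + -1),
          (ci + 0, cj + 1), (ci + 1, cj + -1), (ci + 1, cj + 0), (ci + 1, cj + 1)].foldl
          (fun res pos =>
            if (fun x => decide (0 ≤ x ∧ x < (matrix.length : Int))) pos.1 &&
               (fun x => decide (0 ≤ x ∧ x < ((matrix.headD []).length : Int))) pos.2 then
              res ++ [(fun i j => PySem.List.pyGetD (PySem.List.pyGetD matrix i []) j 0) pos.1 pos.2]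
            else res) []) := rfl
    _ = (([ci + -1, ci + 0, ci + 1].filter
            (fun x => decide (0 ≤ x ∧ x < (matrix.length : Int)))).foldl
          (fun out i =>
            (([cj + -1, cj + 0, cj + 1].filter
                (fun x => decide (0 ≤ x ∧ x < ((matrix.headD []).length : Int)))).foldl
              (fun out j => if (i, j) ≠ (ci + 0, cj + 0) then
                  out ++ [(fun i j => PySem.List.pyGetD (PySem.List.pyGetD matrix i []) j 0) i j]
                else out) out)) []) :=
      pv_key (fun x => decide (0 ≤ x ∧ x < (matrix.length : Int)))
        (fun x => decide (0 ≤ x ∧ x < ((matrix.headD []).length : Int)))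
        (fun i j => PySem.List.pyGetD (PySem.List.pyGetD matrix i []) j 0)
        (ci + -1) (ci + 0) (ci + 1) (cj + -1) (cj + 0) (cj + 1)
        (by omega) (by omega) (by omega) (by omega)
    _ = get_surrounded_elements_alt matrix ci cj := by
      simp only [add_zero, ← sub_eq_add_neg]
      unfold get_surrounded_elements_alt
      rw [pv_clip, pv_clip, pv_range3, pv_range3]
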